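-- pv_equiv track=rewrite | github.com/Wilson-ZheLin/Streamline-Analyst | app/src/util.py | separate_decode_list
-- ===== SOURCE A (Python) =====
-- def separate_decode_list(decided_dict, Y_name):
--     """
--     Process the LLM response and return the lists of columns to be converted to integer, one-hot encoding, and drop
--     """
--     convert_int_cols = [key for key, value in decided_dict.items() if value == 1]
--     one_hot_cols = [key for key, value in decided_dict.items() if value == 2]
--     drop_cols = [key for key, value in decided_dict.items() if value == 3]
--     if Y_name and Y_name in one_hot_cols:
--         one_hot_cols.remove(Y_name)
--         convert_int_cols.append(Y_name)
--     if Y_name and Y_name in drop_cols: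
--         drop_cols.remove(Y_name)
--         convert_int_cols.append(Y_name)
--     return convert_int_cols, one_hot_cols, drop_cols
-- ===== SOURCE B (Python) =====
-- def separate_decode_list(decided_dict, Y_name):
--     """
--     Process the LLM response and return the lists of columns to be converted to integer, one-hot encoding, and drop
--     """
--     convert_int_cols, one_hot_cols, drop_cols = [], [], []
--     buckets = {1: convert_int_cols, 2: one_hot_cols, 3: drop_cols}
--     for key, value in decided_dict.items():
--         if value in buckets:
--             buckets[value].append(key)
--     if Y_name:
--         for lst in (one_hot_cols, drop_cols):
--             if Y_name in lst:
--                 lst.remove(Y_name)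
--                 convert_int_cols.append(Y_name)
--     return convert_int_cols, one_hot_cols, drop_cols
-- ===== Notes on version B (the rewrite author's own statement) =====
-- stated objective: alternative
-- what changed: Replaces the three separate comprehension scans over the dict with a single pass that dispatches each key into its bucket via a value-indexed table, and folds the two Y_name fix-ups into one loop over the two bucket lists.
import Mathlib
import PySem

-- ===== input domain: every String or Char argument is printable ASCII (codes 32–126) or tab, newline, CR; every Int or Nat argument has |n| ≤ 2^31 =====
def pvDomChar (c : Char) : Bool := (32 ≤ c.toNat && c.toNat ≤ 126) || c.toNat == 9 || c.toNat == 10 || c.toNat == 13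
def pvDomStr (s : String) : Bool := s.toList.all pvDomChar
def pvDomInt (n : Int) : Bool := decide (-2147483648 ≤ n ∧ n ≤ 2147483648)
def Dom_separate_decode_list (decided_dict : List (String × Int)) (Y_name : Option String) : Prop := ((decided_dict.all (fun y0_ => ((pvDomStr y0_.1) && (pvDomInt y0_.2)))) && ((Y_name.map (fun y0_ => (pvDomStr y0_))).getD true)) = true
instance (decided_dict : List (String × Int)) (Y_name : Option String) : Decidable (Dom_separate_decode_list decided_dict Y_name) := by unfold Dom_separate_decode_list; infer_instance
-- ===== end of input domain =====

-- B makes one dispatching pass over the dict instead of A's three comprehension scans,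
-- and runs the two Y_name fix-ups as one loop over the two bucket lists; return value only, same result.

-- ===== PORT A =====
-- A: three comprehensions, then the two Y_name fix-ups inline ('if Y_name and Y_name in lst').
def separate_decode_list (decided_dict : List (String × Int)) (Y_name : Option String) : List String × List String × List String :=
  let convert_int_cols := (decided_dict.filter (fun kv => kv.2 == 1)).map Prod.fst
  let one_hot_cols := (decided_dict.filter (fun kv => kv.2 == 2)).map Prod.fst
  let drop_cols := (decided_dict.filter (fun kv => kv.2 == 3)).map Prod.fst
  let p1 :=
    match Y_name with
    | some y => if (!(y == "")) && one_hot_cols.contains y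
        then (convert_int_cols ++ [y], (PySem.List.remove? one_hot_cols y).getD one_hot_cols)
        else (convert_int_cols, one_hot_cols)
    | none => (convert_int_cols, one_hot_cols)
  let p2 :=
    match Y_name with
    | some y => if (!(y == "")) && drop_cols.contains y
        then (p1.1 ++ [y], (PySem.List.remove? drop_cols y).getD drop_cols)
        else (p1.1, drop_cols)
    | none => (p1.1, drop_cols)
  (p2.1, p1.2, p2.2)

-- ===== PORT B =====
-- the loop body of B's 'for lst in (one_hot_cols, drop_cols)'
def pvFixB (y : String) (ci L : List String) : List String × List String :=
  if L.contains y then (ci ++ [y], (PySem.List.remove? L y).getD L) else (ci, L)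

def separate_decode_list_alt (decided_dict : List (String × Int)) (Y_name : Option String) : List String × List String × List String :=
  let b := decided_dict.foldl (fun acc kv =>
      if kv.2 == 1 then (acc.1 ++ [kv.1], acc.2.1, acc.2.2)
      else if kv.2 == 2 then (acc.1, acc.2.1 ++ [kv.1], acc.2.2)
      else if kv.2 == 3 then (acc.1, acc.2.1, acc.2.2 ++ [kv.1])
      else acc) ([], [], [])
  match Y_name with
  | some y =>
      if !(y == "") then
        let q1 := pvFixB y b.1 b.2.1
        let q2 := pvFixB y q1.1 b.2.2
        (q2.1, q1.2, q2.2)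
      else b
  | none => b

-- ===== PRECONDITION & SPEC =====
def Spec_separate_decode_list (decided_dict : List (String × Int)) (Y_name : Option String) (out : List String × List String × List String) : Prop := out = separate_decode_list_alt decided_dict Y_name
instance (decided_dict : List (String × Int)) (Y_name : Option String) (out : List String × List String × List String) : Decidable (Spec_separate_decode_list decided_dict Y_name out) := by unfold Spec_separate_decode_list; infer_instance

-- ===== CLAIM (what is proved, stated in full; the proofs are below) =====
def Claim_equal_separate_decode_list : Prop := ∀ (decided_dict : List (String × Int)) (Y_name : Option String), Dom_separate_decode_list decided_dict Y_name → Spec_separate_decode_list decided_dict Y_name (separate_decode_list decided_dict Y_name)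

-- ===== LEMMAS AND PROOFS =====

-- B's single dispatch pass builds exactly A's three filtered projections.
lemma pvDispatch_eq (d : List (String × Int)) (ci oh dr : List String) :
    d.foldl (fun acc kv =>
      if kv.2 == 1 then (acc.1 ++ [kv.1], acc.2.1, acc.2.2)
      else if kv.2 == 2 then (acc.1, acc.2.1 ++ [kv.1], acc.2.2)
      else if kv.2 == 3 then (acc.1, acc.2.1, acc.2.2 ++ [kv.1])
      else acc) (ci, oh, dr)
    = (ci ++ (d.filter (fun kv => kv.2 == 1)).map Prod.fst,
       oh ++ (d.filter (fun kv => kv.2 == 2)).map Prod.fst,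
       dr ++ (d.filter (fun kv => kv.2 == 3)).map Prod.fst) := by
  induction d generalizing ci oh dr with
  | nil => simp
  | cons kv t ih =>
    rw [List.foldl_cons]
    by_cases h1 : kv.2 = 1
    · have hb : (kv.2 == 1) = true := by simp [h1]
      simp only [hb, if_true]
      rw [ih]
      simp [h1]
    · have hb : (kv.2 == 1) = false := by simp [h1]
      by_cases h2 : kv.2 = 2
      · have hb2 : (kv.2 == 2) = true := by simp [h2]
        simp only [hb, hb2, if_true, Bool.false_eq_true, if_false]
        rw [ih]
        simp [h2]
      · have hb2 : (kv.2 == 2) = false := by simp [h2]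
        by_cases h3 : kv.2 = 3
        · have hb3 : (kv.2 == 3) = true := by simp [h3]
          simp only [hb, hb2, hb3, if_true, Bool.false_eq_true, if_false]
          rw [ih]
          simp [h3]
        · have hb3 : (kv.2 == 3) = false := by simp [h3]
          simp only [hb, hb2, hb3, Bool.false_eq_true, if_false]
          rw [ih]
          simp [hb, hb2, hb3]

-- ===== VERDICT (by name: the statement is the Claim_ definition above) =====
theorem separate_decode_list_spec : Claim_equal_separate_decode_list := by
  intro d Y _
  show separate_decode_list d Y = separate_decode_list_alt d Y
  unfold separate_decode_list separate_decode_list_alt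
  rw [pvDispatch_eq]
  cases Y with
  | none => simp
  | some y =>
    by_cases hy : y = ""
    · simp [hy]
    · simp only [pvFixB]
      by_cases h1 : ((d.filter (fun kv => kv.2 == 2)).map Prod.fst).contains y <;>
        by_cases h2 : ((d.filter (fun kv => kv.2 == 3)).map Prod.fst).contains y <;>
          simp [hy]
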